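-- pv_equiv track=rewrite | github.com/brneto/fabric-mcp-server | helpers/text.py | _extract_from_identity_section
-- ===== SOURCE A (Python) =====
-- def _find_identity_section_start(lines: list[str]) -> int:
--     """Find the index where the IDENTITY section starts, or -1 if not found."""
--     for i, line in enumerate(lines):
--         if line.strip().lower().startswith("# identity"):
--             return i + 1
--     return -1
--
-- def _should_stop_collecting(stripped: str) -> bool:
--     """Check if we should stop collecting description lines."""
--     if stripped.startswith("#"):
--         return True
--     if stripped.lower().startswith("take a"):
--         return True
--     return False
--
-- def _extract_from_identity_section(lines: list[str]) -> list[str]: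
--     """Extract description lines from the IDENTITY section."""
--     start_idx = _find_identity_section_start(lines)
--     if start_idx < 0:
--         return []
--
--     description_lines = []
--     for line in lines[start_idx:]:
--         stripped = line.strip()
--
--         if _should_stop_collecting(stripped):
--             break
--
--         # Skip empty lines at the start
--         if not description_lines and not stripped:
--             continue
--
--
--         if stripped:
--             description_lines.append(stripped)
--             if len(description_lines) >= 3:
--                 break
--
--     return description_lines
-- ===== SOURCE B (Python) =====
-- def _extract_from_identity_section(lines: list[str]) -> list[str]:
--     """Extract description lines from the IDENTITY section (staged/declarative pipeline)."""
--     stripped = [l.strip() for l in lines]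
--     headers = [i for i, s in enumerate(stripped)
--                if s.lower().startswith("# identity")]
--     if not headers:
--         return []
--     body = stripped[headers[0] + 1:]
--     stops = [i for i, s in enumerate(body)
--              if s.startswith("#") or s.lower().startswith("take a")]
--     if stops:
--         body = body[:stops[0]]
--     return [s for s in body if s][:3]
-- ===== Notes on version B (the rewrite author's own statement) =====
-- stated objective: alternative
-- what changed: Replaced A's stateful scan (helper finding the header index, then an imperative collect loop with skip/break/3-limit control flow) with a declarative staged pipeline: strip all lines once, locate header and stop positions via index comprehensions, truncate by slicing, then filter non-empty and take the first 3.
import Mathlib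
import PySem

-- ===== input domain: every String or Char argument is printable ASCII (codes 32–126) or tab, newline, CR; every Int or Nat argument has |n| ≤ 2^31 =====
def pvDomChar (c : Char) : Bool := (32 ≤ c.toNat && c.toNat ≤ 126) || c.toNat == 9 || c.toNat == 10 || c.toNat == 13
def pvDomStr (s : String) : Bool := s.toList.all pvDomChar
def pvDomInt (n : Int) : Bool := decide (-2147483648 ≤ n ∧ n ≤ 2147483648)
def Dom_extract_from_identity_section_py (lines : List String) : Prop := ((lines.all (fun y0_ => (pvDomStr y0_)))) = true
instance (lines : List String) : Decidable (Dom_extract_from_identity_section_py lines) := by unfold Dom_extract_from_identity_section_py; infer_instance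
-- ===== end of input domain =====

-- B replaces A's stateful scan (find header index, then an imperative collect loop with
-- skip/break/3-limit control flow) with a declarative staged pipeline: strip all lines once,
-- locate header/stop positions via index comprehensions, slice, filter non-empty, take 3.
-- Objective: alternative decomposition, same cost.

-- ===== PORT A =====
-- line.strip().lower().startswith("# identity")
def pvHdrA (line : String) : Bool :=
  PySem.Str.startswith (PySem.Str.lower (PySem.Str.strip line)) "# identity"

-- _find_identity_section_start: enumerate with index i, return i+1 on match, -1 otherwise
def findIdentityStart : List String → Int → Int
  | [], _ => -1
  | line :: rest, i => if pvHdrA line then i + 1 else findIdentityStart rest (i + 1)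

-- _should_stop_collecting
def shouldStopCollecting (stripped : String) : Bool :=
  if PySem.Str.startswith stripped "#" then true
  else if PySem.Str.startswith (PySem.Str.lower stripped) "take a" then true
  else false

-- A's collecting loop over lines[start_idx:] with accumulator description_lines and breaks
def collectDesc : List String → List String → List String
  | [], acc => acc
  | line :: rest, acc =>
    let stripped := PySem.Str.strip line
    if shouldStopCollecting stripped then acc
    else if acc.isEmpty && (stripped == "") then collectDesc rest acc
    else if stripped == "" then collectDesc rest acc
    else
      let acc' := acc ++ [stripped]
      if 3 ≤ acc'.length then acc' else collectDesc rest acc'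

def extract_from_identity_section_py (lines : List String) : List String :=
  let start_idx := findIdentityStart lines 0
  if start_idx < 0 then []
  else collectDesc (PySem.List.slice lines (some start_idx) none) []

-- ===== PORT B =====
-- the two line tests of Source B's comprehensions
def hdrPred (s : String) : Bool := PySem.Str.startswith (PySem.Str.lower s) "# identity"
def stopPred (s : String) : Bool :=
  PySem.Str.startswith s "#" || PySem.Str.startswith (PySem.Str.lower s) "take a"

-- index comprehension '[i for i, s in enumerate(xs) if pred(s)]'
def idxWhere (pred : String → Bool) : List String → Nat → List Nat
  | [], _ => []
  | s :: rest, i => if pred s then i :: idxWhere pred rest (i + 1) else idxWhere pred rest (i + 1)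

def extract_from_identity_section_py_alt (lines : List String) : List String :=
  let stripped := lines.map PySem.Str.strip
  let headers := idxWhere hdrPred stripped 0
  match headers with
  | [] => []
  | h :: _ =>
    let body := PySem.List.slice stripped (some ((h : Int) + 1)) none
    let stops := idxWhere stopPred body 0
    let body' := match stops with
      | [] => body
      | j :: _ => PySem.List.slice body none (some (j : Int))
    PySem.List.slice (body'.filter (fun s => !(s == ""))) none (some 3)

-- ===== PRECONDITION & SPEC =====
def Spec_extract_from_identity_section_py (lines : List String) (out : List String) : Prop := out = extract_from_identity_section_py_alt lines
instance (lines : List String) (out : List String) : Decidable (Spec_extract_from_identity_section_py lines out) := by unfold Spec_extract_from_identity_section_py; infer_instance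

-- ===== CLAIM (what is proved, stated in full; the proofs are below) =====
def Claim_equal_extract_from_identity_section_py : Prop := ∀ (lines : List String), Dom_extract_from_identity_section_py lines → Spec_extract_from_identity_section_py lines (extract_from_identity_section_py lines)

-- ===== LEMMAS AND PROOFS =====

lemma shouldStop_or (s : String) : shouldStopCollecting s = stopPred s := by
  unfold shouldStopCollecting stopPred
  cases PySem.Str.startswith s "#"
  · simp
  · simp

lemma idxWhere_head (pred : String → Bool) (l : List String) :
    ∀ n, (idxWhere pred l n).head? = (l.findIdx? pred).map (· + n) := by
  induction l with
  | nil => intro n; simp [idxWhere]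
  | cons s rest ih =>
    intro n
    rw [List.findIdx?_cons]
    by_cases h : pred s = true
    · simp [idxWhere, h]
    · simp only [idxWhere, h, Bool.false_eq_true, if_false, ih (n + 1)]
      cases rest.findIdx? pred <;> simp <;> omega

lemma idxWhere_nil_iff (pred : String → Bool) (l : List String) (n : Nat) :
    idxWhere pred l n = [] ↔ l.findIdx? pred = none := by
  constructor
  · intro h
    have := idxWhere_head pred l n
    rw [h] at this
    cases hf : l.findIdx? pred
    · rfl
    · rw [hf] at this; simp at this
  · intro h
    have := idxWhere_head pred l n
    rw [h] at this
    simp at this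
    exact this

lemma findIdentityStart_char (ls : List String) : ∀ i : Nat,
    findIdentityStart ls (i : Int)
      = (ls.findIdx? pvHdrA).elim (-1) (fun j => ((i + j + 1 : Nat) : Int)) := by
  induction ls with
  | nil => intro i; simp [findIdentityStart]
  | cons l rest ih =>
    intro i
    rw [List.findIdx?_cons]
    by_cases h : pvHdrA l = true
    · simp [findIdentityStart, h]
    · have h' : ((i : Int) + 1) = ((i + 1 : Nat) : Int) := by push_cast; ring
      unfold findIdentityStart
      rw [if_neg h, h', ih (i + 1)]
      cases hf : rest.findIdx? pvHdrA with
      | none => simp [h]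
      | some j =>
        simp only [h, Bool.false_eq_true, if_false, Option.map_some, Option.elim_some]
        congr 1
        omega

lemma takeWhile_findIdx?_none {p : String → Bool} :
    ∀ l : List String, l.findIdx? p = none → l.takeWhile (fun x => !p x) = l := by
  intro l
  induction l with
  | nil => intro _; rfl
  | cons x rest ih =>
    intro h
    rw [List.findIdx?_cons] at h
    by_cases hx : p x = true
    · simp [hx] at h
    · simp only [hx, Bool.false_eq_true, if_false, Option.map_eq_none_iff] at h
      simp [hx, ih h]

lemma takeWhile_findIdx?_some {p : String → Bool} :
    ∀ (l : List String) (j : Nat), l.findIdx? p = some j → l.takeWhile (fun x => !p x) = l.take j := by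
  intro l
  induction l with
  | nil => intro j h; simp at h
  | cons x rest ih =>
    intro j h
    rw [List.findIdx?_cons] at h
    by_cases hx : p x = true
    · simp only [hx, if_true] at h
      cases h
      simp [hx]
    · simp only [hx, Bool.false_eq_true, if_false] at h
      cases hf : rest.findIdx? p with
      | none => rw [hf] at h; simp at h
      | some k =>
        rw [hf] at h
        simp only [Option.map_some, Option.some_inj] at h
        subst h
        simp [hx, ih k hf]

-- A's collect loop computes: take-up-to-stop, drop empties, first (3 - |acc|) lines
lemma collect_eq (ls : List String) : ∀ acc : List String, acc.length < 3 →
    collectDesc ls acc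
      = acc ++ (((ls.map PySem.Str.strip).takeWhile (fun s => !shouldStopCollecting s)).filter
          (fun s => !(s == ""))).take (3 - acc.length) := by
  induction ls with
  | nil => intro acc _; simp [collectDesc]
  | cons l rest ih =>
    intro acc hacc
    simp only [collectDesc, List.map_cons, List.takeWhile_cons]
    by_cases hstop : shouldStopCollecting (PySem.Str.strip l) = true
    · simp [hstop]
    · simp only [hstop, Bool.false_eq_true, if_false, Bool.not_false, if_true, List.filter_cons]
      by_cases hemp : (PySem.Str.strip l == "") = true
      · simp only [hemp, Bool.and_true, Bool.not_true, Bool.false_eq_true, if_false]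
        by_cases he : acc.isEmpty = true <;> simp [he, ih acc hacc]
      · simp only [hemp, Bool.and_false, Bool.false_eq_true, if_false, Bool.not_false, if_true]
        have hlen : (acc ++ [PySem.Str.strip l]).length = acc.length + 1 := by simp
        by_cases h3 : 3 ≤ (acc ++ [PySem.Str.strip l]).length
        · have : 3 - acc.length = 1 := by omega
          rw [if_pos h3, this]
          simp
        · have ha2 : acc.length + 1 < 3 := by omega
          rw [if_neg h3, ih (acc ++ [PySem.Str.strip l]) (by omega)]
          have : 3 - acc.length = (3 - (acc ++ [PySem.Str.strip l]).length) + 1 := by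
            rw [hlen]; omega
          rw [this, List.take_succ_cons]
          simp

lemma ports_eq (lines : List String) :
    extract_from_identity_section_py lines = extract_from_identity_section_py_alt lines := by
  unfold extract_from_identity_section_py extract_from_identity_section_py_alt
  dsimp only
  have hmap : (lines.map PySem.Str.strip).findIdx? hdrPred = lines.findIdx? pvHdrA := by
    rw [List.findIdx?_map]
    have hfun : (hdrPred ∘ PySem.Str.strip) = pvHdrA := by
      funext x
      simp only [Function.comp_apply, hdrPred, pvHdrA]
    rw [hfun]
  have h0 : findIdentityStart lines 0 = findIdentityStart lines ((0 : Nat) : Int) := by norm_num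
  rw [h0, findIdentityStart_char lines 0]
  cases hf : lines.findIdx? pvHdrA with
  | none =>
    have hB : idxWhere hdrPred (lines.map PySem.Str.strip) 0 = [] := by
      rw [idxWhere_nil_iff, hmap, hf]
    rw [hB]
    simp
  | some j =>
    have hB : (idxWhere hdrPred (lines.map PySem.Str.strip) 0).head? = some j := by
      rw [idxWhere_head, hmap, hf]; simp
    cases hL : idxWhere hdrPred (lines.map PySem.Str.strip) 0 with
    | nil => rw [hL] at hB; simp at hB
    | cons h t =>
      rw [hL] at hB
      simp only [List.head?_cons, Option.some_inj] at hB
      subst hB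
      simp only [Option.elim_some]
      rw [if_neg (by omega)]
      have hc1 : ((0 + h + 1 : Nat) : Int) = ((h + 1 : Nat) : Int) := by norm_num
      have hc2 : ((h : Nat) : Int) + 1 = ((h + 1 : Nat) : Int) := by push_cast; ring
      rw [hc1, hc2, PySem.List.slice_from_natCast, PySem.List.slice_from_natCast]
      rw [collect_eq (lines.drop (h + 1)) [] (by simp)]
      rw [← List.map_drop]
      have hstopP : (fun s => !shouldStopCollecting s) = (fun s : String => !stopPred s) := by
        funext s; rw [shouldStop_or]
      rw [hstopP]
      rw [show (3 : Int) = ((3 : Nat) : Int) by norm_num]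
      cases hs : (List.map PySem.Str.strip (List.drop (h + 1) lines)).findIdx? stopPred with
      | none =>
        have hst : idxWhere stopPred (List.map PySem.Str.strip (List.drop (h + 1) lines)) 0 = [] := by
          rw [idxWhere_nil_iff, hs]
        rw [hst]
        rw [takeWhile_findIdx?_none _ hs, PySem.List.slice_to_natCast]
        simp
      | some k =>
        have hhd : (idxWhere stopPred (List.map PySem.Str.strip (List.drop (h + 1) lines)) 0).head?
            = some k := by
          rw [idxWhere_head, hs]; simp
        cases hsl : idxWhere stopPred (List.map PySem.Str.strip (List.drop (h + 1) lines)) 0 with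
        | nil => rw [hsl] at hhd; simp at hhd
        | cons k0 t0 =>
          rw [hsl] at hhd
          simp only [List.head?_cons, Option.some_inj] at hhd
          subst hhd
          rw [takeWhile_findIdx?_some _ k0 hs, PySem.List.slice_to_natCast]
          simp [PySem.List.slice_to_natCast]

-- ===== VERDICT (by name: the statement is the Claim_ definition above) =====
theorem extract_from_identity_section_py_spec : Claim_equal_extract_from_identity_section_py := by
  intro lines _
  unfold Spec_extract_from_identity_section_py
  exact ports_eq lines
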